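-- pv_equiv track=rewrite | github.com/TechGod58/AxionFW_OS | AxionOS/runtime/promotion/safe_uri.py | _mime_allowed
-- ===== SOURCE A (Python) =====
-- from typing import Any
--
-- def _mime_allowed(mime_type: str, allowed: list[Any]) -> bool:
--     if not allowed:
--         return True
--     mt = mime_type.strip().lower()
--     if not mt:
--         return False
--     for rule in allowed:
--         r = str(rule).strip().lower()
--         if not r:
--             continue
--         if r.endswith("/"):
--             if mt.startswith(r):
--                 return True
--         elif mt == r:
--             return True
--     return False
-- ===== SOURCE B (Python) =====
-- def _mime_allowed(mime_type, allowed):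
--     if not allowed:
--         return True
--     mt = mime_type.strip().lower()
--     if not mt:
--         return False
--     # Inverted matching: enumerate every rule string that could match mt --
--     # mt itself (exact rule, or prefix rule when mt ends in '/') and each
--     # prefix of mt ending at a '/' (the only possible matching prefix rules)
--     # -- then test each normalized rule for membership in that set.
--     candidates = {mt}
--     for i, ch in enumerate(mt):
--         if ch == "/":
--             candidates.add(mt[: i + 1])
--     return any(str(rule).strip().lower() in candidates for rule in allowed)
-- ===== Notes on version B (the rewrite author's own statement) =====
-- stated objective: alternative
-- what changed: Inverts the matching direction: instead of branching per rule on exact-vs-prefix against mt, B precomputes from mt the complete set of rule strings that could match it (mt itself plus every prefix of mt ending at a '/') and then answers with a plain membership test per rule.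
import Mathlib
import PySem

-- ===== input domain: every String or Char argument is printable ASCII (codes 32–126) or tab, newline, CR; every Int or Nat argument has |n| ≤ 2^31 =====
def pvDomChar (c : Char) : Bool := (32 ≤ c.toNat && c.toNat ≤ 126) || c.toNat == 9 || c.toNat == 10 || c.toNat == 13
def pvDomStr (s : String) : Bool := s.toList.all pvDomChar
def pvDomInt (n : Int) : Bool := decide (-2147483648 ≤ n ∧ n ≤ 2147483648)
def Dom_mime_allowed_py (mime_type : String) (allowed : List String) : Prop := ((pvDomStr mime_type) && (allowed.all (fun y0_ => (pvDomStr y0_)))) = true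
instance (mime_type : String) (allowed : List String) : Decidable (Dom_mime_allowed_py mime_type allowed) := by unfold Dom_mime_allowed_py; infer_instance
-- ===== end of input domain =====

-- B inverts the matching direction: it precomputes from mt the set of all rule strings that
-- could match it (mt itself plus every '/'-terminated prefix of mt) and tests each normalized
-- rule by membership; same answer, a different algorithm, no speed claim.

-- ===== PORT A =====
-- the 'for rule in allowed' loop with its early returns
def mimeLoopA (mt : String) : List String → Bool
  | [] => false
  | rule :: rest =>
    let r := PySem.Str.lower (PySem.Str.strip rule)
    if r = "" then mimeLoopA mt rest
    else if PySem.Str.endswith r "/" then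
      (if PySem.Str.startswith mt r then true else mimeLoopA mt rest)
    else if mt = r then true else mimeLoopA mt rest

def mime_allowed_py (mime_type : String) (allowed : List String) : Bool :=
  if allowed = [] then true
  else
    let mt := PySem.Str.lower (PySem.Str.strip mime_type)
    if mt = "" then false
    else mimeLoopA mt allowed

-- ===== PORT B =====
-- candidates = {mt}; for i, ch in enumerate(mt): if ch == '/': candidates.add(mt[:i+1])
def mimeCandidates (mt : String) : PySem.Set String :=
  (PySem.List.enumerate mt.toList).foldl
    (fun c p => if p.2 = '/' then PySem.Set.add c (PySem.Str.slice mt none (some (p.1 + 1))) else c)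
    (PySem.Set.ofList [mt])

-- any(str(rule).strip().lower() in candidates for rule in allowed)
def mime_allowed_py_alt (mime_type : String) (allowed : List String) : Bool :=
  if allowed = [] then true
  else
    let mt := PySem.Str.lower (PySem.Str.strip mime_type)
    if mt = "" then false
    else
      let candidates := mimeCandidates mt
      allowed.any (fun rule => PySem.Set.contains candidates (PySem.Str.lower (PySem.Str.strip rule)))

-- ===== PRECONDITION & SPEC =====
def Spec_mime_allowed_py (mime_type : String) (allowed : List String) (out : Bool) : Prop := out = mime_allowed_py_alt mime_type allowed
instance (mime_type : String) (allowed : List String) (out : Bool) : Decidable (Spec_mime_allowed_py mime_type allowed out) := by unfold Spec_mime_allowed_py; infer_instance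

-- ===== CLAIM =====
def Claim_equal_mime_allowed_py : Prop := ∀ (mime_type : String) (allowed : List String), Dom_mime_allowed_py mime_type allowed → Spec_mime_allowed_py mime_type allowed (mime_allowed_py mime_type allowed)

-- ===== LEMMAS AND PROOFS =====

-- A's per-rule test, factored out of the loop
def mimeMatchRule (mt r : String) : Bool :=
  if r = "" then false
  else if PySem.Str.endswith r "/" then PySem.Str.startswith mt r
  else decide (mt = r)

-- A's early-return loop is 'any' of the per-rule test
theorem mimeLoopA_eq_any (mt : String) (l : List String) :
    mimeLoopA mt l = l.any (fun rule => mimeMatchRule mt (PySem.Str.lower (PySem.Str.strip rule))) := by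
  induction l with
  | nil => rfl
  | cons rule rest ih =>
    rw [List.any_cons, ← ih]
    show (let r := PySem.Str.lower (PySem.Str.strip rule);
      if r = "" then mimeLoopA mt rest
      else if PySem.Str.endswith r "/" then
        (if PySem.Str.startswith mt r then true else mimeLoopA mt rest)
      else if mt = r then true else mimeLoopA mt rest)
      = (mimeMatchRule mt (PySem.Str.lower (PySem.Str.strip rule)) || mimeLoopA mt rest)
    generalize PySem.Str.lower (PySem.Str.strip rule) = r
    unfold mimeMatchRule
    by_cases h0 : r = ""
    · simp [h0]
    · rw [if_neg h0, if_neg h0]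
      by_cases h1 : PySem.Str.endswith r "/" = true
      · rw [if_pos h1, if_pos h1]
        cases PySem.Str.startswith mt r <;> simp
      · rw [if_neg h1, if_neg h1]
        by_cases h2 : mt = r <;> simp [h2]

-- membership in the candidate-building fold
theorem mem_mimeCandidates_fold (mt : String) (l : List Char) (s : Int)
    (c0 : PySem.Set String) (x : String) :
    (x ∈ (PySem.List.enumerate l s).foldl
      (fun c p => if p.2 = '/' then PySem.Set.add c (PySem.Str.slice mt none (some (p.1 + 1))) else c) c0)
    ↔ x ∈ c0 ∨ ∃ p ∈ PySem.List.enumerate l s, p.2 = '/' ∧ x = PySem.Str.slice mt none (some (p.1 + 1)) := by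
  induction l generalizing s c0 with
  | nil => simp [PySem.List.enumerate_nil]
  | cons ch t ih =>
    rw [PySem.List.enumerate_cons]
    simp only [List.foldl_cons, List.mem_cons]
    by_cases h : ch = '/'
    · subst h
      rw [show (if ((s, '/') : Int × Char).2 = '/' then
            PySem.Set.add c0 (PySem.Str.slice mt none (some (((s, '/') : Int × Char).1 + 1))) else c0)
          = PySem.Set.add c0 (PySem.Str.slice mt none (some (s + 1))) from if_pos rfl]
      rw [ih]
      rw [PySem.Set.mem_add]
      constructor
      · rintro (⟨hx | hx⟩ | ⟨p, hp, hs, hxe⟩)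
        · exact Or.inl hx
        · exact Or.inr ⟨(s, '/'), Or.inl rfl, rfl, hx⟩
        · exact Or.inr ⟨p, Or.inr hp, hs, hxe⟩
      · rintro (hx | ⟨p, hp, hs, hxe⟩)
        · exact Or.inl (Or.inl hx)
        · rcases hp with hp | hp
          · subst hp; exact Or.inl (Or.inr hxe)
          · exact Or.inr ⟨p, hp, hs, hxe⟩
    · rw [show (if ((s, ch) : Int × Char).2 = '/' then
            PySem.Set.add c0 (PySem.Str.slice mt none (some (((s, ch) : Int × Char).1 + 1))) else c0)
          = c0 from if_neg h]
      rw [ih]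
      constructor
      · rintro (hx | ⟨p, hp, hs, hxe⟩)
        · exact Or.inl hx
        · exact Or.inr ⟨p, Or.inr hp, hs, hxe⟩
      · rintro (hx | ⟨p, hp, hs, hxe⟩)
        · exact Or.inl hx
        · rcases hp with hp | hp
          · exact absurd (by rw [hp] at hs; exact hs) h
          · exact Or.inr ⟨p, hp, hs, hxe⟩

-- membership in candidates, as prefixes of mt
theorem mem_mimeCandidates (mt r : String) :
    r ∈ mimeCandidates mt ↔
      r = mt ∨ ∃ k, ∃ h : k < mt.toList.length, mt.toList[k] = '/' ∧ r.toList = mt.toList.take (k + 1) := by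
  unfold mimeCandidates
  rw [mem_mimeCandidates_fold]
  constructor
  · rintro (hx | ⟨p, hp, hs, hx⟩)
    · left; simpa [PySem.Set.ofList] using hx
    · rcases (PySem.List.mem_enumerate_iff _ _ _).mp hp with ⟨k, hk, hpk⟩
      right
      refine ⟨k, hk, ?_, ?_⟩
      · rw [hpk] at hs; exact hs
      · rw [hx, hpk]
        have hcast : ((0 : Int) + (k : Int)) + 1 = ((k + 1 : Nat) : Int) := by push_cast; ring
        simp only [PySem.Str.toList_slice, PySem.Chars.slice_eq_listSlice, hcast,
          PySem.List.slice_to_natCast]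
  · rintro (hx | ⟨k, hk, hs, hx⟩)
    · left; simpa [PySem.Set.ofList] using hx
    · right
      refine ⟨((0 : Int) + (k : Int), mt.toList[k]), (PySem.List.mem_enumerate_iff _ _ _).mpr ⟨k, hk, rfl⟩, hs, ?_⟩
      apply String.toList_inj.mp
      have hcast : ((0 : Int) + (k : Int)) + 1 = ((k + 1 : Nat) : Int) := by push_cast; ring
      simp only [PySem.Str.toList_slice, PySem.Chars.slice_eq_listSlice, hcast,
        PySem.List.slice_to_natCast, hx]

-- list-level core: candidates built from m are exactly the strings A's per-rule test accepts
theorem slash_prefix_char (m rl : List Char) (hm : m ≠ []) :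
    ((rl = m ∨ ∃ k, ∃ h : k < m.length, m[k] = '/' ∧ rl = m.take (k + 1)) ↔
      (rl ≠ [] ∧ (if ['/'] <:+ rl then rl <+: m else rl = m))) := by
  constructor
  · rintro (hx | ⟨k, hk, hs, hx⟩)
    · subst hx
      refine ⟨hm, ?_⟩
      split <;> simp
    · subst hx
      have htake : m.take (k + 1) = m.take k ++ [m[k]] := by
        rw [List.take_add_one]
        simp [List.getElem?_eq_getElem hk]
      rw [htake]
      refine ⟨by simp [hm], ?_⟩
      rw [if_pos (by rw [hs]; exact List.suffix_append _ _)]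
      rw [← htake]
      exact List.take_prefix _ _
  · rintro ⟨hne, hx⟩
    by_cases hsuf : ['/'] <:+ rl
    · rw [if_pos hsuf] at hx
      rcases hsuf with ⟨t, ht⟩
      right
      have hlen : rl.length ≤ m.length := hx.length_le
      have hlrl : rl.length = t.length + 1 := by rw [← ht]; simp
      have hk : t.length < m.length := by omega
      have htk : rl = m.take (t.length + 1) := by
        have := List.prefix_iff_eq_take.mp hx
        rw [this, hlrl]
      refine ⟨t.length, hk, ?_, htk⟩
      have happ : t ++ ['/'] = m.take t.length ++ [m[t.length]'hk] := by
        rw [ht, htk, List.take_add_one]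
        simp [List.getElem?_eq_getElem hk]
      have hlen2 : t.length = (m.take t.length).length := by
        simp [List.length_take]; omega
      have := List.append_inj_right happ hlen2
      simpa using this.symm
    · rw [if_neg hsuf] at hx
      exact Or.inl hx

-- pointwise: membership in candidates equals A's per-rule test (for nonempty mt)
theorem contains_eq_matchRule (mt r : String) (hm : mt ≠ "") :
    PySem.Set.contains (mimeCandidates mt) r = mimeMatchRule mt r := by
  have hml : mt.toList ≠ [] := fun h => hm (String.toList_inj.mp (by simp [h]))
  have hmem : r ∈ mimeCandidates mt ↔ (r.toList ≠ [] ∧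
      (if ['/'] <:+ r.toList then r.toList <+: mt.toList else r.toList = mt.toList)) := by
    rw [mem_mimeCandidates, ← slash_prefix_char _ _ hml]
    constructor
    · rintro (h | h)
      · exact Or.inl (by rw [h])
      · exact Or.inr h
    · rintro (h | h)
      · exact Or.inl (String.toList_inj.mp h)
      · exact Or.inr h
  have hc : PySem.Set.contains (mimeCandidates mt) r = decide (r ∈ mimeCandidates mt) := by
    simp [PySem.Set.contains]
  unfold mimeMatchRule
  rw [hc]
  by_cases h0 : r = ""
  · subst h0
    rw [if_pos rfl]
    simp [hmem]
  · rw [if_neg h0]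
    have hr0 : r.toList ≠ [] := fun h => h0 (String.toList_inj.mp (by simp [h]))
    by_cases h1 : PySem.Str.endswith r "/" = true
    · have hsuf : ['/'] <:+ r.toList := by
        have := (PySem.Chars.endswith_iff r.toList ("/").toList).mp (by simpa using h1)
        simpa using this
      rw [if_pos h1]
      have hsw : PySem.Str.startswith mt r = decide (r.toList <+: mt.toList) := by
        by_cases h : r.toList <+: mt.toList
        · simp only [h, decide_true]
          simpa using (PySem.Chars.startswith_iff mt.toList r.toList).mpr h
        · simp only [h, decide_false]
          by_contra hh
          exact h ((PySem.Chars.startswith_iff _ _).mp (by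
            simpa using (Bool.not_eq_false _).mp hh))
      rw [hsw]
      rw [decide_eq_decide]
      rw [hmem, if_pos hsuf]
      simp [hr0]
    · have hsuf : ¬ ['/'] <:+ r.toList := by
        intro h
        exact h1 (by
          have := (PySem.Chars.endswith_iff r.toList ("/").toList).mpr (by simpa using h)
          simpa using this)
      rw [if_neg h1]
      rw [decide_eq_decide]
      rw [hmem, if_neg hsuf]
      constructor
      · rintro ⟨-, h⟩
        exact (String.toList_inj.mp h).symm
      · intro h
        exact ⟨hr0, by rw [h]⟩

-- ===== VERDICT =====
theorem mime_allowed_py_spec : Claim_equal_mime_allowed_py := by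
  intro mime_type allowed _
  unfold Spec_mime_allowed_py mime_allowed_py mime_allowed_py_alt
  by_cases hA : allowed = []
  · simp [hA]
  · simp only [hA, if_false]
    by_cases hmt : PySem.Str.lower (PySem.Str.strip mime_type) = ""
    · simp [hmt]
    · simp only [hmt, if_false]
      rw [mimeLoopA_eq_any]
      exact PySem.List.any_congr_mem (fun rule _ => (contains_eq_matchRule _ _ hmt).symm)
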